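-- pv_equiv track=rewrite | github.com/swobenator/SecurityFundementals_GroupCA | crypto/rsa.py | rsa_encrypt_key
-- ===== SOURCE A (Python) =====
-- def power(base, expo, m):
--     res = 1 #variable for result
--     base = base % m #base in modulo range
--     while expo > 0: #loop until base becomes 0
--         if expo & 1: #check if least significant bit is 1
--             res = (res * base) % m #if it is multiply the current res by base
--         base = (base * base) % m #each time square the base  move to the next binary bit of the exponent
--         expo = expo // 2 #shifts the exponent one bit to the right
--     return res
--
-- def encrypt_rsa(m, e, n):
--     return power(m, e, n)
--
-- def rsa_encrypt_key(key_plaintext, public_key):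
--
--     #Encrypted the string character-by-character using RSA.
--     #Returns a list of integers cipher blocks
--
--     e, n = public_key
--     cipher_blocks = []
--     for ch in key_plaintext:
--         m = ord(ch)
--         if m >= n:
--             # With our prime ranges, n will be huge compared to ord(ch), so this won't happen.
--             raise ValueError("Plaintext block too large for RSA modulus")
--         cipher_blocks.append(encrypt_rsa(m, e, n))
--     return cipher_blocks
-- ===== SOURCE B (Python) =====
-- def power(base, expo, m):
--     # top-down recursive square-and-multiply
--     if expo <= 0:
--         return 1
--     half = power(base, expo // 2, m)
--     result = (half * half) % m
--     if expo & 1: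
--         result = (result * (base % m)) % m
--     return result
--
--
-- def rsa_encrypt_key(key_plaintext, public_key):
--     e, n = public_key
--     if any(ord(ch) >= n for ch in key_plaintext):
--         raise ValueError("Plaintext block too large for RSA modulus")
--     return [power(ord(ch), e, n) for ch in key_plaintext]
-- ===== Notes on version B (the rewrite author's own statement) =====
-- stated objective: alternative
-- what changed: The iterative bit-loop modular exponentiation is replaced by a top-down recursive square-and-multiply, and the append loop with an inline oversize guard becomes a separate oversize pre-check followed by a map comprehension.
import Mathlib
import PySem

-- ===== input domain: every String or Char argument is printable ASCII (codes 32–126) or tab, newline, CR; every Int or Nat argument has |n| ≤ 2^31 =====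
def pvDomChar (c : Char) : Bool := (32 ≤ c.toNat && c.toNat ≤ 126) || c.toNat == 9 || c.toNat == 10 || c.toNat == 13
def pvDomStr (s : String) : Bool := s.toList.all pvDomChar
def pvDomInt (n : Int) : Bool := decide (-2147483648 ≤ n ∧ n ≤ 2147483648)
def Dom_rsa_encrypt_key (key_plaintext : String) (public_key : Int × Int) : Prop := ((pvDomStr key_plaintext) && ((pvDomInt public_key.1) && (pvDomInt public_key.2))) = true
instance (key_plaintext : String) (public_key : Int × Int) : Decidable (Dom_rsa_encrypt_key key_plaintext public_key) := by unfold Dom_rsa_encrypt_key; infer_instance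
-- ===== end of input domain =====

-- B replaces the iterative bit-loop modexp by a recursive top-down square-and-multiply and
-- the guarded append loop by an oversize pre-check plus a map (alternative decomposition, same cost).


-- ===== PORT A =====
-- the while-loop of `power`: state (res, base, expo); expo halves each iteration
def powerLoop (res base expo m : Int) : Int :=
  if h : expo > 0 then
    powerLoop (if PySem.Int.band expo 1 ≠ 0 then PySem.Int.mod (res * base) m else res)
      (PySem.Int.mod (base * base) m) (PySem.Int.floordiv expo 2) m
  else res
termination_by expo.toNat
decreasing_by
  have h2 := PySem.Int.floordiv_eq_ediv_of_pos (a := expo) (b := 2) (by norm_num)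
  rw [h2]; omega

def power (base expo m : Int) : Int := powerLoop 1 (PySem.Int.mod base m) expo m

def encrypt_rsa (m e n : Int) : Int := power m e n

-- the for-loop of rsa_encrypt_key; `none` = the ValueError raise
def rsaLoop (e n : Int) (chs : List Char) (acc : List Int) : Option (List Int) :=
  match chs with
  | [] => some acc
  | ch :: rest =>
      let m : Int := (ch.toNat : Int)
      if m ≥ n then none
      else rsaLoop e n rest (acc ++ [encrypt_rsa m e n])

def rsa_encrypt_key (key_plaintext : String) (public_key : Int × Int) : List Int :=
  (rsaLoop public_key.1 public_key.2 key_plaintext.toList []).getD []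

-- ===== PORT B =====
-- recursive top-down square-and-multiply
def powerRec (base expo m : Int) : Int :=
  if h : expo ≤ 0 then 1
  else
    let half := powerRec base (PySem.Int.floordiv expo 2) m
    let result := PySem.Int.mod (half * half) m
    if PySem.Int.band expo 1 ≠ 0 then PySem.Int.mod (result * PySem.Int.mod base m) m
    else result
termination_by expo.toNat
decreasing_by
  have h2 := PySem.Int.floordiv_eq_ediv_of_pos (a := expo) (b := 2) (by norm_num)
  rw [h2]; omega

def rsa_encrypt_key_alt (key_plaintext : String) (public_key : Int × Int) : List Int :=
  if key_plaintext.toList.any (fun ch => (ch.toNat : Int) ≥ public_key.2) then []  -- the ValueError raise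
  else key_plaintext.toList.map (fun ch => powerRec (ch.toNat : Int) public_key.1 public_key.2)

-- ===== PRECONDITION & SPEC =====
-- Pre_ excludes exactly the inputs where A raises ValueError (some ord(ch) ≥ n; this also covers
-- n ≤ 0 with a nonempty string, where the guard fires on the first character).
def Pre_rsa_encrypt_key (key_plaintext : String) (public_key : Int × Int) : Prop :=
  (key_plaintext.toList.all (fun ch => (ch.toNat : Int) < public_key.2)) = true
instance (key_plaintext : String) (public_key : Int × Int) : Decidable (Pre_rsa_encrypt_key key_plaintext public_key) := by unfold Pre_rsa_encrypt_key; infer_instance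

def pvWitness_rsa_encrypt_key : String × (Int × Int) := ("A", (3, 66))

def Spec_rsa_encrypt_key (key_plaintext : String) (public_key : Int × Int) (out : List Int) : Prop := out = rsa_encrypt_key_alt key_plaintext public_key
instance (key_plaintext : String) (public_key : Int × Int) (out : List Int) : Decidable (Spec_rsa_encrypt_key key_plaintext public_key out) := by unfold Spec_rsa_encrypt_key; infer_instance

-- ===== CLAIM (what is proved, stated in full; the proofs are below) =====
def Claim_equal_rsa_encrypt_key : Prop := ∀ (key_plaintext : String) (public_key : Int × Int), Dom_rsa_encrypt_key key_plaintext public_key → Pre_rsa_encrypt_key key_plaintext public_key → Spec_rsa_encrypt_key key_plaintext public_key (rsa_encrypt_key key_plaintext public_key)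


-- ===== LEMMAS AND PROOFS =====

theorem pow_emod' (a : Int) (k : Nat) (m : Int) : a ^ k % m = (a % m) ^ k % m := by
  induction k with
  | zero => simp
  | succ n ih =>
    rw [pow_succ, pow_succ, Int.mul_emod, ih]
    conv_rhs => rw [Int.mul_emod]
    simp [Int.emod_emod_of_dvd _ (dvd_refl m)]

theorem emod_mul_emod (a c m : Int) : a % m * c % m = a * c % m := by
  rw [Int.mul_emod, Int.emod_emod_of_dvd _ (dvd_refl m), ← Int.mul_emod]

theorem mul_emod_emod (a c m : Int) : a * (c % m) % m = a * c % m := by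
  rw [Int.mul_emod, Int.emod_emod_of_dvd _ (dvd_refl m), ← Int.mul_emod]

theorem mul_mod_pow (r b mm : Int) (j : Nat) :
    r * ((b * b % mm) ^ j) % mm = r * b ^ (2 * j) % mm := by
  rw [Int.mul_emod, ← pow_emod', ← Int.mul_emod, pow_mul, pow_two]

theorem helper_even (X m : Int) : X % m * (X % m) % m = X * X % m := by
  rw [emod_mul_emod X (X % m) m, mul_emod_emod X X m]

theorem helper_odd (X b m : Int) : X % m * (X % m) % m * (b % m) % m = X * X * b % m := by
  rw [emod_mul_emod X (X % m) m, mul_emod_emod X X m,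
    emod_mul_emod (X * X) (b % m) m, mul_emod_emod (X * X) b m]

-- PySem floordiv/band of a cast Nat, positive modulus
theorem floordiv_cast_two (k : Nat) : PySem.Int.floordiv (k : Int) 2 = ((k / 2 : Nat) : Int) := by
  rw [PySem.Int.floordiv_eq_ediv_of_pos (by norm_num)]
  exact (Int.natCast_ediv k 2).symm

theorem band_cast_one (k : Nat) : PySem.Int.band (k : Int) 1 = ((k % 2 : Nat) : Int) := by
  rw [PySem.Int.band_one, PySem.Int.mod_eq_emod_of_pos (by norm_num)]
  exact (Int.natCast_emod k 2).symm

-- A's loop computes res * base^k mod m (positive exponent and modulus)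
theorem powerLoop_nat (m : Int) (hm : 0 < m) :
    ∀ k : Nat, 0 < k → ∀ res base : Int, powerLoop res base (k : Int) m = res * base ^ k % m := by
  intro k
  induction k using Nat.strong_induction_on with
  | _ k ih =>
    intro hk res base
    rw [powerLoop, dif_pos (by exact_mod_cast hk)]
    rw [floordiv_cast_two, band_cast_one]
    simp only [PySem.Int.mod_eq_emod_of_pos hm]
    rcases Nat.eq_or_lt_of_le hk with h1 | h2
    · -- k = 1
      rw [← h1]
      norm_num
      rw [powerLoop, dif_neg (by norm_num)]
    · -- k ≥ 2
      have hk2 : 2 ≤ k := h2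
      have hdm : 2 * (k / 2) + k % 2 = k := by omega
      rw [ih (k / 2) (by omega) (by omega)]
      rcases Nat.mod_two_eq_zero_or_one k with h0 | h1
      · rw [h0]
        norm_num
        rw [mul_mod_pow]
        have e : 2 * (k / 2) = k := by omega
        rw [e]
      · rw [h1]
        norm_num
        rw [mul_mod_pow, emod_mul_emod]
        rw [mul_assoc, ← pow_succ']
        have e : 2 * (k / 2) + 1 = k := by omega
        rw [e]

-- B's recursion computes base^k mod m (positive exponent and modulus)
theorem powerRec_nat (m : Int) (hm : 0 < m) :
    ∀ k : Nat, 0 < k → ∀ base : Int, powerRec base (k : Int) m = base ^ k % m := by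
  intro k
  induction k using Nat.strong_induction_on with
  | _ k ih =>
    intro hk base
    rw [powerRec, dif_neg (by omega : ¬(k : Int) ≤ 0)]
    rw [floordiv_cast_two, band_cast_one]
    simp only [PySem.Int.mod_eq_emod_of_pos hm]
    rcases Nat.eq_or_lt_of_le hk with h1 | h2
    · -- k = 1
      rw [← h1]
      norm_num
      rw [powerRec, dif_pos (by norm_num)]
      rw [one_mul, emod_mul_emod 1 (base % m) m, one_mul, Int.emod_emod_of_dvd _ (dvd_refl m)]
    · -- k ≥ 2
      rw [ih (k / 2) (by omega) (by omega)]
      rcases Nat.mod_two_eq_zero_or_one k with h0 | h1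
      · rw [h0]
        norm_num
        rw [helper_even, ← pow_add]
        have e : k / 2 + k / 2 = k := by omega
        rw [e]
      · rw [h1]
        norm_num
        rw [helper_odd, ← pow_add, ← pow_succ]
        have e : k / 2 + k / 2 + 1 = k := by omega
        rw [e]

-- the two exponentiation routines agree for a positive modulus
theorem power_eq_powerRec (base expo m : Int) (hm : 0 < m) :
    power base expo m = powerRec base expo m := by
  unfold power
  by_cases hpos : 0 < expo
  · obtain ⟨k, hk⟩ : ∃ k : Nat, expo = (k : Int) := ⟨expo.toNat, (Int.toNat_of_nonneg (le_of_lt hpos)).symm⟩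
    subst hk
    have hk0 : 0 < k := by exact_mod_cast hpos
    rw [powerLoop_nat m hm k hk0, powerRec_nat m hm k hk0]
    rw [PySem.Int.mod_eq_emod_of_pos hm, one_mul, ← pow_emod']
  · rw [powerLoop, dif_neg hpos, powerRec, dif_pos (by omega)]

theorem rsaLoop_eq (e n : Int) (chs : List Char) :
    ∀ acc : List Int, (∀ ch ∈ chs, (ch.toNat : Int) < n) →
    rsaLoop e n chs acc = some (acc ++ chs.map (fun ch => powerRec (ch.toNat : Int) e n)) := by
  induction chs with
  | nil => intro acc _; simp [rsaLoop]
  | cons ch rest ih =>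
    intro acc h
    have hlt : (ch.toNat : Int) < n := h ch List.mem_cons_self
    have hn : 0 < n := lt_of_le_of_lt (by exact_mod_cast Nat.zero_le ch.toNat) hlt
    rw [rsaLoop]
    simp only [if_neg (not_le.mpr hlt)]
    rw [ih _ (fun c hc => h c (List.mem_cons_of_mem ch hc))]
    simp [encrypt_rsa, power_eq_powerRec _ _ _ hn]


-- ===== VERDICT (by name: the statement is the Claim_ definition above) =====
theorem rsa_encrypt_key_spec : Claim_equal_rsa_encrypt_key := by
  intro kp pk _ hpre
  simp only [Pre_rsa_encrypt_key, List.all_eq_true, decide_eq_true_eq] at hpre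
  unfold Spec_rsa_encrypt_key rsa_encrypt_key rsa_encrypt_key_alt
  rw [rsaLoop_eq pk.1 pk.2 kp.toList [] hpre]
  have : kp.toList.any (fun ch => (ch.toNat : Int) ≥ pk.2) = false := by
    simp only [List.any_eq_false, decide_eq_true_eq]
    intro ch hch
    exact not_le.mpr (hpre ch hch)
  simp [this]
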